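-- pv_equiv track=rewrite | github.com/afcarl/it3105 | module3/ng_constraint_network.py | get_start_index_domains
-- ===== SOURCE A (Python) =====
-- def get_start_index_domains(size, segments):
--     num_segments = len(segments)
--     min_start_indexes = []
--     min_start_index = 0
--     for i in range(len(segments)):
--         min_start_indexes.append(min_start_index)
--         min_start_index += segments[i] + 1
--
--     start_index_domains = []
--     for i in range(num_segments):
--         min_start_index = min_start_indexes[i]
--         domain = []
--         num_remaining_segments = len(min_start_indexes) - i - 1
--         remaining_segments_sum = sum(segments[i + 1:num_segments])
--         own_size = segments[i]
--         upper_bound = size - num_remaining_segments - remaining_segments_sum - own_size + 1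
--         for x in range(min_start_index, upper_bound):
--             domain.append(x)
--         start_index_domains.append(domain)
--     return start_index_domains
-- ===== SOURCE B (Python) =====
-- def get_start_index_domains(size, segments):
--     # Divide and conquer: split the segments in half, solve each half on its
--     # own shrunken board independently, then translate the right half's
--     # domains past the space the left half needs; no cumulative start-index
--     # list and no per-index suffix sums are kept.
--     n = len(segments)
--     if n == 0:
--         return []
--     if n == 1:
--         return [list(range(0, size - segments[0] + 1))]
--     mid = n // 2
--     left, right = segments[:mid], segments[mid:]
--     left_dom = get_start_index_domains(size - sum(right) - len(right), left)
--     right_dom = get_start_index_domains(size - sum(left) - mid, right)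
--     off = sum(left) + mid
--     return left_dom + [[x + off for x in d] for d in right_dom]
-- ===== Notes on version B (the rewrite author's own statement) =====
-- stated objective: alternative
-- what changed: B is divide-and-conquer: it splits the segment list in half, solves each half independently on its own shrunken board, and translates the right half's domains past the space the left half needs, keeping no cumulative start-index list and no per-index suffix sums.
import Mathlib
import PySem

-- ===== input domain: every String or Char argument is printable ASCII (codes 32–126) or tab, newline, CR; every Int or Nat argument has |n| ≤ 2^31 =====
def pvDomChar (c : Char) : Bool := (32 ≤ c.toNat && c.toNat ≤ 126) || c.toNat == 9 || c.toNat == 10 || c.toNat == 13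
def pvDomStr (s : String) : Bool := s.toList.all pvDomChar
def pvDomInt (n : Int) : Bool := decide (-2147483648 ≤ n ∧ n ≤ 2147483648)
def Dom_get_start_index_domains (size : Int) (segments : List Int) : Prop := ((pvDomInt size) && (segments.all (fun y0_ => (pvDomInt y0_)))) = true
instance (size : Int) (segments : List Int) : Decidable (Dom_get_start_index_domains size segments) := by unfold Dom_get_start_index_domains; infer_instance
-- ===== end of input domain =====

-- B is divide-and-conquer: split the segments in half, solve each half on its own
-- shrunken board, translate the right half's domains past the left half's space
-- (objective: alternative; no speed claimed).

-- ===== PORT A =====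
-- pyGetD … 0 is exact here: every index the loops use is in range.
def get_start_index_domains (size : Int) (segments : List Int) : List (List Int) :=
  let num_segments : Int := (segments.length : Int)
  let st := (PySem.List.pyRange 0 (segments.length : Int) 1).foldl
    (fun (st : List Int × Int) i =>
      (st.1 ++ [st.2], st.2 + PySem.List.pyGetD segments i 0 + 1)) ([], 0)
  let min_start_indexes := st.1
  (PySem.List.pyRange 0 num_segments 1).foldl
    (fun (acc : List (List Int)) i =>
      let min_start_index := PySem.List.pyGetD min_start_indexes i 0
      let num_remaining_segments : Int := (min_start_indexes.length : Int) - i - 1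
      let remaining_segments_sum :=
        (PySem.List.slice segments (some (i + 1)) (some num_segments)).sum
      let own_size := PySem.List.pyGetD segments i 0
      let upper_bound := size - num_remaining_segments - remaining_segments_sum - own_size + 1
      let domain := (PySem.List.pyRange min_start_index upper_bound 1).foldl
        (fun (d : List Int) x => d ++ [x]) []
      acc ++ [domain]) []

-- ===== PORT B =====
def get_start_index_domains_alt (size : Int) (segments : List Int) : List (List Int) :=
  match segments with
  | [] => []
  | [s] => [PySem.List.pyRange 0 (size - s + 1) 1]
  | s1 :: s2 :: rest =>
    let segs := s1 :: s2 :: rest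
    let mid := segs.length / 2
    let left := segs.take mid
    let right := segs.drop mid
    let left_dom := get_start_index_domains_alt (size - right.sum - (right.length : Int)) left
    let right_dom := get_start_index_domains_alt (size - left.sum - (mid : Int)) right
    let off := left.sum + (mid : Int)
    left_dom ++ right_dom.map (fun d => d.map (fun x => x + off))
termination_by segments.length
decreasing_by
  all_goals simp [List.length_take, List.length_drop]; omega

-- ===== PRECONDITION & SPEC =====
def Spec_get_start_index_domains (size : Int) (segments : List Int) (out : List (List Int)) : Prop := out = get_start_index_domains_alt size segments
instance (size : Int) (segments : List Int) (out : List (List Int)) : Decidable (Spec_get_start_index_domains size segments out) := by unfold Spec_get_start_index_domains; infer_instance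

-- ===== CLAIM =====
def Claim_equal_get_start_index_domains : Prop := ∀ (size : Int) (segments : List Int), Dom_get_start_index_domains size segments → Spec_get_start_index_domains size segments (get_start_index_domains size segments)

-- ===== LEMMAS AND PROOFS =====

-- the sequence of minimal start indexes: m, m+s0+1, m+s0+s1+2, …
def pvStarts : List Int → Int → List Int
  | [], _ => []
  | s :: t, m => m :: pvStarts t (m + s + 1)

theorem pvStarts_length (xs : List Int) (m : Int) : (pvStarts xs m).length = xs.length := by
  induction xs generalizing m with
  | nil => rfl
  | cons s t ih => simp [pvStarts, ih]

theorem pvStarts_getElem (xs : List Int) (m : Int) (k : Nat) (hk : k < xs.length) :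
    (pvStarts xs m)[k]'(by rw [pvStarts_length]; exact hk) = m + (xs.take k).sum + k := by
  induction xs generalizing m k with
  | nil => simp at hk
  | cons s t ih =>
    cases k with
    | zero => simp [pvStarts]
    | succ k =>
      simp only [pvStarts, List.getElem_cons_succ, List.take_succ_cons, List.sum_cons]
      rw [ih (m + s + 1) k (by simpa using hk)]
      push_cast; ring

theorem pvStarts_shift (xs : List Int) (m c : Int) :
    pvStarts xs (m + c) = (pvStarts xs m).map (fun v => v + c) := by
  induction xs generalizing m with
  | nil => rfl
  | cons s t ih =>
    simp only [pvStarts, List.map_cons, List.cons.injEq]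
    refine ⟨trivial, ?_⟩
    have : m + c + s + 1 = (m + s + 1) + c := by ring
    rw [this, ih]

theorem pvRange_shift (a b c : Int) :
    (PySem.List.pyRange a b 1).map (fun x => x + c) = PySem.List.pyRange (a + c) (b + c) 1 := by
  rw [PySem.List.pyRange_one, PySem.List.pyRange_one, List.map_map]
  have : b + c - (a + c) = b - a := by ring
  rw [this]
  apply List.map_congr_left
  intro k _
  simp [Function.comp]; ring

theorem pvA_first_loop (xs : List Int) (acc : List Int) (m : Int) :
    (xs.foldl (fun (st : List Int × Int) seg => (st.1 ++ [st.2], st.2 + seg + 1)) (acc, m)).1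
      = acc ++ pvStarts xs m := by
  induction xs generalizing acc m with
  | nil => simp [pvStarts]
  | cons s t ih => simp [pvStarts, ih]

theorem pvStarts_append (l r : List Int) (m : Int) :
    pvStarts (l ++ r) m = pvStarts l m ++ pvStarts r (m + l.sum + (l.length : Int)) := by
  induction l generalizing m with
  | nil => simp [pvStarts]
  | cons s t ih =>
    simp only [List.cons_append, pvStarts, ih, List.append_eq, List.cons.injEq, true_and]
    have h : m + s + 1 + t.sum + (t.length : Int)
        = m + (s :: t).sum + ((s :: t).length : Int) := by
      simp [List.sum_cons]; push_cast; ring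
    rw [h]

theorem pvB_eq (size : Int) (segments : List Int) :
    get_start_index_domains_alt size segments
      = (pvStarts segments 0).map
          (fun v => PySem.List.pyRange v (v + (size - segments.sum - (segments.length : Int) + 2)) 1) := by
  match segments with
  | [] => simp [get_start_index_domains_alt, pvStarts]
  | [s] =>
    rw [get_start_index_domains_alt]
    simp only [pvStarts, List.map_cons, List.map_nil]
    congr 2
    simp; ring
  | s1 :: s2 :: rest =>
    rw [get_start_index_domains_alt]
    rw [pvB_eq, pvB_eq]
    have hlen : (s1 :: s2 :: rest).length / 2 ≤ (s1 :: s2 :: rest).length := Nat.div_le_self _ _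
    set segs := s1 :: s2 :: rest with hsegs
    set mid := segs.length / 2 with hmid
    have hlt : (segs.take mid).length = mid := by simp [List.length_take]; omega
    have hsum : (segs.take mid).sum + (segs.drop mid).sum = segs.sum := by
      rw [← List.sum_append, List.take_append_drop]
    have hL : size - (segs.drop mid).sum - ((segs.drop mid).length : Int)
          - (segs.take mid).sum - ((segs.take mid).length : Int) + 2
        = size - segs.sum - (segs.length : Int) + 2 := by
      have h2 : (segs.take mid).length + (segs.drop mid).length = segs.length := by simp; omega
      push_cast [← hsum, ← h2]; ring
    have hR : size - (segs.take mid).sum - (mid : Int)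
          - (segs.drop mid).sum - ((segs.drop mid).length : Int) + 2
        = size - segs.sum - (segs.length : Int) + 2 := by
      have h2 : (segs.take mid).length + (segs.drop mid).length = segs.length := by simp; omega
      push_cast [← hsum, ← h2, hlt]; ring
    rw [hL, hR]
    conv_rhs => rw [← List.take_append_drop mid segs]
    rw [pvStarts_append, List.map_append]
    congr 1
    · rw [List.take_append_drop]
    · rw [List.take_append_drop]
      rw [List.map_map]
      have hoff : (0 : Int) + (segs.take mid).sum + ((segs.take mid).length : Int)
          = 0 + ((segs.take mid).sum + (mid : Int)) := by rw [hlt]; ring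
      rw [hoff, pvStarts_shift, List.map_map]
      apply List.map_congr_left
      intro v _
      simp only [Function.comp]
      rw [pvRange_shift]
      congr 1
      ring
termination_by segments.length
decreasing_by
  all_goals simp [List.length_take, List.length_drop]; omega

theorem pvA_eq (size : Int) (segments : List Int) :
    get_start_index_domains size segments
      = (pvStarts segments 0).map
          (fun v => PySem.List.pyRange v (v + (size - segments.sum - (segments.length : Int) + 2)) 1) := by
  unfold get_start_index_domains
  simp only []
  rw [PySem.List.foldl_pyRange_zero_pyGetD' segments 0
        (fun (st : List Int × Int) seg => (st.1 ++ [st.2], st.2 + seg + 1)) ([], 0)]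
  rw [pvA_first_loop]
  simp only [List.nil_append]
  rw [PySem.List.foldl_append_singleton_eq_map
        (fun i => (PySem.List.pyRange
            (PySem.List.pyGetD (pvStarts segments 0) i 0)
            (size - ((((pvStarts segments 0)).length : Int) - i - 1) -
               (PySem.List.slice segments (some (i + 1)) (some (segments.length : Int))).sum -
               PySem.List.pyGetD segments i 0 + 1) 1).foldl
            (fun (d : List Int) x => d ++ [x]) [])]
  simp only [List.nil_append, PySem.List.foldl_append_singleton, PySem.List.pyRange_zero_nat,
    List.map_map]
  apply List.ext_getElem
  · simp [pvStarts_length]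
  · intro k hk1 hk2
    have hk : k < segments.length := by simpa using hk1
    simp only [List.getElem_map, Function.comp, List.getElem_range]
    rw [pvStarts_getElem segments 0 k hk]
    rw [PySem.List.pyGetD_natCast, PySem.List.pyGetD_natCast]
    have hgd : (pvStarts segments 0).getD k 0 = 0 + (segments.take k).sum + k := by
      rw [List.getD_eq_getElem _ _ (by rw [pvStarts_length]; exact hk)]
      exact pvStarts_getElem segments 0 k hk
    have hsd : segments.getD k 0 = segments[k] := List.getD_eq_getElem _ _ hk
    have hslice : PySem.List.slice segments (some ((k : Int) + 1)) (some (segments.length : Int))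
        = segments.drop (k + 1) := by
      have h1 : ((k : Int) + 1) = (((k + 1 : Nat)) : Int) := by push_cast; ring
      rw [h1, PySem.List.slice_natCast]
      exact List.take_of_length_le (by simp)
    have hsum : (segments.take (k + 1)).sum + (segments.drop (k + 1)).sum = segments.sum :=
      List.sum_take_add_sum_drop _ _
    have hts : (segments.take (k + 1)).sum = (segments.take k).sum + segments[k] := by
      rw [List.take_add_one, List.getElem?_eq_getElem hk, List.sum_append,
        Option.toList_some, List.sum_cons, List.sum_nil, add_zero]
    rw [hgd, hsd, hslice, pvStarts_length]
    congr 1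
    omega

-- ===== VERDICT =====
theorem get_start_index_domains_spec : Claim_equal_get_start_index_domains := by
  intro size segments _
  show get_start_index_domains size segments = get_start_index_domains_alt size segments
  rw [pvA_eq, pvB_eq]
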